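-- pv_equiv track=rewrite | github.com/wesleyd/aoc15 | day03b.py | santa
-- ===== SOURCE A (Python) =====
-- from collections import defaultdict
--
-- def santa(directions):
--     gifts = defaultdict(int)
--     x, y = 0, 0
--     gifts[(x,y)] = 1
--     for direction in directions.strip():
--         if direction == '^':
--             y += 1
--         elif direction == 'v':
--             y -= 1
--         elif direction == '<':
--             x -= 1
--         elif direction == '>':
--             x += 1
--         gifts[(x,y)] += 1
--     return gifts
-- ===== SOURCE B (Python) =====
-- from collections import defaultdict
--
-- def santa(directions):
--     moves = directions.strip()
--
--     # Divide and conquer: solve(seg) returns (counts, end) where counts maps each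
--     # position visited after a step of seg (relative to seg's start) to its visit
--     # count, keys in first-visit order, and end is seg's net displacement.
--     # Correct because a walk over u+v is the walk over u followed by the walk over
--     # v translated by u's net displacement, and translation preserves counts and
--     # first-visit order.
--     def solve(seg):
--         n = len(seg)
--         if n == 0:
--             return {}, (0, 0)
--         if n == 1:
--             d = seg[0]
--             s = ((d == '>') - (d == '<'), (d == '^') - (d == 'v'))
--             return {s: 1}, s
--         left, lend = solve(seg[:n // 2])
--         right, rend = solve(seg[n // 2:])
--         for p, c in right.items():
--             q = (p[0] + lend[0], p[1] + lend[1])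
--             left[q] = left.get(q, 0) + c
--         return left, (lend[0] + rend[0], lend[1] + rend[1])
--
--     counts, _ = solve(moves)
--     gifts = defaultdict(int)
--     gifts[(0, 0)] = 1
--     for p, c in counts.items():
--         gifts[p] += c
--     return gifts
-- ===== Notes on version B (the rewrite author's own statement) =====
-- stated objective: alternative
-- what changed: B replaces A's single incremental dict-update pass by a divide-and-conquer: recursively solve the two halves of the move string into (relative count dict, net displacement) and merge by translating the right half's counts by the left half's displacement, seeding the start cell at the top.
import Mathlib
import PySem

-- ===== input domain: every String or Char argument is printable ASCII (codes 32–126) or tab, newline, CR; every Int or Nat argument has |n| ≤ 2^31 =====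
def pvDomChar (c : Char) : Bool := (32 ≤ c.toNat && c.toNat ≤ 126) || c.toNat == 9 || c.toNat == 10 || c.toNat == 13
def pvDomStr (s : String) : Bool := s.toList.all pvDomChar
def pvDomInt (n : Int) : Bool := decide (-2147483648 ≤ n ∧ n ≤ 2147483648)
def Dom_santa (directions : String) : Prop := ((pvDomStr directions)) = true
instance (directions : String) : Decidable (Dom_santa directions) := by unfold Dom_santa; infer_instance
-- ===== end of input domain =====

-- B replaces A's incremental dict pass by divide and conquer (solve halves, merge
-- translated count dicts); same return value (a dict, rendered as (x, y, count)
-- triples in insertion order), alternative decomposition, no speed claim.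

-- ===== PORT A =====
-- A's loop: x,y updated by the if/elif chain, then gifts[(x,y)] += 1
def santaLoopA : List Char → Int → Int → PySem.Dict (Int × Int) Int → PySem.Dict (Int × Int) Int
  | [], _, _, gifts => gifts
  | c :: cs, x, y, gifts =>
    let (x, y) : Int × Int :=
      if c = '^' then (x, y + 1)
      else if c = 'v' then (x, y - 1)
      else if c = '<' then (x - 1, y)
      else if c = '>' then (x + 1, y)
      else (x, y)
    santaLoopA cs x y (gifts.modify (x, y) 0 (· + 1))

def santa (directions : String) : List (Int × Int × Int) :=
  (santaLoopA (PySem.Str.strip directions).toList 0 0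
      (PySem.Dict.empty.insert (0, 0) 1)).items.map (fun pc => (pc.1.1, pc.1.2, pc.2))

-- ===== PORT B =====
-- the one-char base case: ((d == '>') - (d == '<'), (d == '^') - (d == 'v'))
def stepB (c : Char) : Int × Int :=
  ((if c = '>' then 1 else 0) - (if c = '<' then 1 else 0),
   (if c = '^' then 1 else 0) - (if c = 'v' then 1 else 0))

-- solve(seg) = (counts of positions relative to seg's start, net displacement);
-- seg[:n//2] / seg[n//2:] are List.take / List.drop (slice with 0 ≤ m ≤ len)
def solveB : List Char → PySem.Dict (Int × Int) Int × (Int × Int)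
  | [] => (PySem.Dict.empty, (0, 0))
  | [c] => (PySem.Dict.empty.insert (stepB c) 1, stepB c)
  | c1 :: c2 :: rest =>
    let seg := c1 :: c2 :: rest
    let n := seg.length
    let l := solveB (seg.take (n / 2))
    let r := solveB (seg.drop (n / 2))
    (r.1.items.foldl
        (fun d pc => d.modify (pc.1.1 + l.2.1, pc.1.2 + l.2.2) 0 (· + pc.2)) l.1,
     (l.2.1 + r.2.1, l.2.2 + r.2.2))
termination_by seg => seg.length
decreasing_by
  · simp [List.length_take]; omega
  · simp [List.length_drop]; omega

def santa_alt (directions : String) : List (Int × Int × Int) :=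
  let counts := (solveB (PySem.Str.strip directions).toList).1
  let gifts : PySem.Dict (Int × Int) Int := PySem.Dict.empty.insert (0, 0) 1
  (counts.items.foldl (fun d pc => d.modify pc.1 0 (· + pc.2)) gifts).items.map
    (fun pc => (pc.1.1, pc.1.2, pc.2))

-- ===== PRECONDITION & SPEC =====
def Spec_santa (directions : String) (out : List (Int × Int × Int)) : Prop := out = santa_alt directions
instance (directions : String) (out : List (Int × Int × Int)) : Decidable (Spec_santa directions out) := by unfold Spec_santa; infer_instance

-- ===== CLAIM (what is proved, stated in full; the proofs are below) =====
def Claim_equal_santa : Prop := ∀ (directions : String), Dom_santa directions → Spec_santa directions (santa directions)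

-- ===== LEMMAS AND PROOFS =====

-- componentwise addition of positions
def add2 (a b : Int × Int) : Int × Int := (a.1 + b.1, a.2 + b.2)

-- positions visited after each step of cs, starting from p
def pathP : List Char → Int × Int → List (Int × Int)
  | [], _ => []
  | c :: cs, p => add2 p (stepB c) :: pathP cs (add2 p (stepB c))

-- net displacement of cs
def endv : List Char → Int × Int
  | [] => (0, 0)
  | c :: cs => add2 (stepB c) (endv cs)

theorem add2_zero_left (p : Int × Int) : add2 (0, 0) p = p := by simp [add2]

theorem add2_zero_right (p : Int × Int) : add2 p (0, 0) = p := by simp [add2]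

theorem add2_assoc (a b c : Int × Int) : add2 (add2 a b) c = add2 a (add2 b c) := by
  simp [add2, Prod.ext_iff]; omega

theorem add2_inj (a : Int × Int) : Function.Injective (fun q : Int × Int => add2 q a) := by
  intro p q h
  simp only [add2, Prod.ext_iff] at h ⊢
  omega

-- A's if/elif chain is one add2 step
theorem moveA_eq (x y : Int) (c : Char) :
    (if c = '^' then (x, y + 1)
     else if c = 'v' then (x, y - 1)
     else if c = '<' then (x - 1, y)
     else if c = '>' then (x + 1, y)
     else (x, y) : Int × Int) = add2 (x, y) (stepB c) := by
  by_cases h1 : c = '^'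
  · subst h1
    have hs : stepB '^' = ((0 : Int), (1 : Int)) := by decide
    rw [hs]; simp [add2]
  by_cases h2 : c = 'v'
  · subst h2
    have hs : stepB 'v' = ((0 : Int), (-1 : Int)) := by decide
    rw [if_neg h1, hs]; simp [add2]; ring
  by_cases h3 : c = '<'
  · subst h3
    have hs : stepB '<' = ((-1 : Int), (0 : Int)) := by decide
    rw [if_neg h1, if_neg h2, hs]; simp [add2]; ring
  by_cases h4 : c = '>'
  · subst h4
    have hs : stepB '>' = ((1 : Int), (0 : Int)) := by decide
    rw [if_neg h1, if_neg h2, if_neg h3, hs]; simp [add2]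
  · simp [h1, h2, h3, h4, stepB, add2]

-- A's loop is a counting fold over the path
theorem loopA_eq (cs : List Char) (x y : Int) (d : PySem.Dict (Int × Int) Int) :
    santaLoopA cs x y d
      = (pathP cs (x, y)).foldl (fun d q => d.modify q 0 (· + 1)) d := by
  induction cs generalizing x y d with
  | nil => rfl
  | cons c cs ih =>
    simp only [santaLoopA, pathP, moveA_eq, add2, stepB]
    exact ih _ _ _

theorem pathP_append (u v : List Char) (p : Int × Int) :
    pathP (u ++ v) p = pathP u p ++ pathP v (add2 p (endv u)) := by
  induction u generalizing p with
  | nil => simp [pathP, endv, add2_zero_right]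
  | cons c u ih =>
    simp only [List.cons_append, pathP, endv, ih, List.cons_append]
    rw [← add2_assoc]

theorem endv_append (u v : List Char) : endv (u ++ v) = add2 (endv u) (endv v) := by
  induction u with
  | nil => simp [endv, add2_zero_left]
  | cons c u ih => simp only [List.cons_append, endv, ih, add2_assoc]

theorem pathP_shift (cs : List Char) (a : Int × Int) :
    ∀ p, pathP cs (add2 a p) = (pathP cs p).map (fun q => add2 a q) := by
  induction cs with
  | nil => intro p; rfl
  | cons c cs ih =>
    intro p
    simp only [pathP, List.map_cons, add2_assoc, ih]

theorem pathP_from (cs : List Char) (a : Int × Int) :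
    pathP cs a = (pathP cs (0, 0)).map (fun q => add2 q a) := by
  have h := pathP_shift cs a (0, 0)
  rw [add2_zero_right] at h
  rw [h]
  apply List.map_congr_left
  intro q _
  simp [add2, Prod.ext_iff]; omega

-- getD after a fold that adds pc.2 at key g pc.1
theorem getD_foldl_modify_addv (g : (Int × Int) → (Int × Int)) :
    ∀ (l : List ((Int × Int) × Int)) (d : PySem.Dict (Int × Int) Int) (k : Int × Int),
      (l.foldl (fun d pc => d.modify (g pc.1) 0 (· + pc.2)) d).getD k 0
        = d.getD k 0 + (l.map (fun pc => if g pc.1 = k then pc.2 else 0)).sum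
  | [], d, k => by simp
  | pc :: l, d, k => by
    simp only [List.foldl_cons, List.map_cons, List.sum_cons,
      getD_foldl_modify_addv g l]
    rw [PySem.Dict.getD_modify]
    by_cases h : g pc.1 = k
    · rw [if_pos h.symm, if_pos h, h]; ring
    · rw [if_neg (fun hk => h hk.symm), if_neg h]; ring

-- sum of an indicator map over a nodup list picks the single entry
theorem sum_ite_single :
    ∀ (l : List (Int × Int)) (a : Int × Int) (c : (Int × Int) → Int),
      l.Nodup → a ∈ l →
      (l.map (fun x => if x = a then c x else 0)).sum = c a := by
  intro l
  induction l with
  | nil => intro a c _ h; cases h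
  | cons x l ih =>
    intro a c hnd hmem
    rcases List.nodup_cons.mp hnd with ⟨hx, hl⟩
    simp only [List.map_cons, List.sum_cons]
    rcases List.mem_cons.mp hmem with h | h
    · subst h
      rw [if_pos rfl]
      have hz : (l.map (fun x => if x = a then c x else 0)).sum = 0 := by
        apply List.sum_eq_zero
        intro y hy
        rcases List.mem_map.mp hy with ⟨z, hz, rfl⟩
        rw [if_neg]
        intro hza; exact hx (hza ▸ hz)
      rw [hz]; ring
    · have hxa : x ≠ a := fun hxa => hx (hxa ▸ h)
      rw [if_neg hxa, ih a c hl h]; ring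

theorem sum_counts_eq_count (f : (Int × Int) → (Int × Int)) (hf : Function.Injective f)
    (w : List (Int × Int)) (k : Int × Int) :
    ((PySem.Set.ofList w).map (fun a => if f a = k then (w.count a : Int) else 0)).sum
      = ((w.map f).count k : Int) := by
  by_cases h : ∃ a, a ∈ w ∧ f a = k
  · obtain ⟨a, haw, hak⟩ := h
    subst hak
    have hrw : (fun a' => if f a' = f a then (w.count a' : Int) else 0)
        = fun a' => if a' = a then (w.count a' : Int) else 0 := by
      funext a'
      simp [hf.eq_iff]
    rw [hrw, sum_ite_single _ a _ (PySem.Set.nodup_ofList w)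
      ((PySem.Set.mem_ofList _ _).mpr haw)]
    rw [List.count_map_of_injective _ f hf]
  · simp only [not_exists, not_and] at h
    have hz : ((PySem.Set.ofList w).map
        (fun a => if f a = k then (w.count a : Int) else 0)).sum = 0 := by
      apply List.sum_eq_zero
      intro y hy
      rcases List.mem_map.mp hy with ⟨a, ha, rfl⟩
      rw [if_neg (h a ((PySem.Set.mem_ofList _ _).mp ha))]
    rw [hz]
    have : (w.map f).count k = 0 := by
      rw [List.count_eq_zero]
      intro hk
      rcases List.mem_map.mp hk with ⟨a, ha, hak⟩
      exact h a ha hak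
    rw [this]; rfl

-- set(w) commutes with an injective map
theorem foldl_add_map (f : (Int × Int) → (Int × Int)) (hf : Function.Injective f) :
    ∀ (w s : List (Int × Int)),
      (w.map f).foldl PySem.Set.add (s.map f) = (w.foldl PySem.Set.add s).map f := by
  intro w
  induction w with
  | nil => intro s; rfl
  | cons x w ih =>
    intro s
    simp only [List.map_cons, List.foldl_cons]
    have hadd : PySem.Set.add (s.map f) (f x) = (PySem.Set.add s x).map f := by
      by_cases hm : x ∈ s
      · rw [PySem.Set.add_of_mem hm, PySem.Set.add_of_mem (List.mem_map_of_mem hm)]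
      · rw [PySem.Set.add_of_not_mem hm, PySem.Set.add_of_not_mem, List.map_append]
        · rfl
        · intro hc
          rcases List.mem_map.mp hc with ⟨a, ha, hfa⟩
          exact hm (hf hfa ▸ ha)
    rw [hadd, ih]

theorem ofList_map (f : (Int × Int) → (Int × Int)) (hf : Function.Injective f)
    (w : List (Int × Int)) :
    PySem.Set.ofList (w.map f) = (PySem.Set.ofList w).map f := by
  rw [PySem.Set.ofList_eq_foldl, PySem.Set.ofList_eq_foldl]
  simpa using foldl_add_map f hf w []

theorem update_ofList_map (s : List (Int × Int)) (w : List (Int × Int))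
    (f : (Int × Int) → (Int × Int)) (hf : Function.Injective f) :
    PySem.Set.update s ((PySem.Set.ofList w).map f) = PySem.Set.update s (w.map f) := by
  rw [PySem.Set.update_eq_append_filter, PySem.Set.update_eq_append_filter]
  have h1 : PySem.Set.ofList ((PySem.Set.ofList w).map f) = (PySem.Set.ofList w).map f :=
    PySem.Set.ofList_eq_self_of_nodup _ (List.Nodup.map hf (PySem.Set.nodup_ofList w))
  rw [h1, ofList_map f hf]

-- merging a counter into d entry-by-entry is the same as counting the mapped list into d
theorem merge_counter (f : (Int × Int) → (Int × Int)) (hf : Function.Injective f)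
    (w : List (Int × Int)) (d : PySem.Dict (Int × Int) Int) (hnd : d.keys.Nodup) :
    (PySem.Dict.counter w).items.foldl (fun d pc => d.modify (f pc.1) 0 (· + pc.2)) d
      = (w.map f).foldl (fun d x => d.modify x 0 (· + 1)) d := by
  have hnL : ((PySem.Dict.counter w).items.foldl
      (fun d pc => d.modify (f pc.1) 0 (· + pc.2)) d).keys.Nodup :=
    PySem.Dict.nodup_keys_foldl_modify_key _ _ _ _ _ hnd
  have hnR : ((w.map f).foldl (fun d x => d.modify x 0 (· + 1)) d).keys.Nodup :=
    PySem.Dict.nodup_keys_foldl_modify_key _ (fun x => x) _ _ _ hnd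
  have hkeys : ((PySem.Dict.counter w).items.foldl
        (fun d pc => d.modify (f pc.1) 0 (· + pc.2)) d).keys
      = ((w.map f).foldl (fun d x => d.modify x 0 (· + 1)) d).keys := by
    rw [PySem.Dict.keys_foldl_modify_key, PySem.Dict.keys_foldl_modify,
      PySem.Dict.items_counter, List.map_map]
    have : ((fun pc : (Int × Int) × Int => f pc.1) ∘ fun k => (k, (w.count k : Int)))
        = f := by funext a; rfl
    rw [this]
    exact update_ofList_map _ _ f hf
  apply PySem.Dict.ext
  rw [PySem.Dict.items_eq_map_keys _ hnL 0, PySem.Dict.items_eq_map_keys _ hnR 0, hkeys]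
  apply List.map_congr_left
  intro k _
  have hL := getD_foldl_modify_addv f ((PySem.Dict.counter w).items) d k
  have hR := PySem.Dict.getD_foldl_modify_add_one (w.map f) d k
  rw [hL, PySem.Dict.items_counter, List.map_map]
  have hcomp : ((fun pc : (Int × Int) × Int => if f pc.1 = k then pc.2 else 0)
      ∘ fun a => (a, (w.count a : Int)))
      = fun a => if f a = k then (w.count a : Int) else 0 := by funext a; rfl
  rw [hcomp, sum_counts_eq_count f hf w k, hR]

theorem counter_single (p : Int × Int) :
    PySem.Dict.counter [p] = PySem.Dict.empty.insert p 1 := rfl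

theorem counter_append (a b : List (Int × Int)) :
    PySem.Dict.counter (a ++ b)
      = b.foldl (fun d x => d.modify x 0 (· + 1)) (PySem.Dict.counter a) := by
  rw [PySem.Dict.counter_eq_foldl, PySem.Dict.counter_eq_foldl, List.foldl_append]

-- divide and conquer computes the counter of the relative path and the displacement
set_option maxHeartbeats 1000000 in
theorem solveB_eq : ∀ cs : List Char,
    solveB cs = (PySem.Dict.counter (pathP cs (0, 0)), endv cs) := by
  intro cs
  induction cs using solveB.induct
  case case1 => rw [solveB]; rfl
  case case2 c =>
    rw [solveB]
    simp only [pathP, endv]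
    rw [add2_zero_left, add2_zero_right, counter_single]
  case case3 c1 c2 rest seg n ihl ihr =>
    rw [solveB]
    rw [ihl, ihr]
    have huv : List.take (n / 2) seg ++ List.drop (n / 2) seg = c1 :: c2 :: rest :=
      List.take_append_drop _ _
    generalize hU : List.take (n / 2) seg = u at huv ⊢
    generalize hV : List.drop (n / 2) seg = v at huv ⊢
    dsimp only
    rw [← huv, pathP_append, add2_zero_left, endv_append, counter_append]
    simp only [Prod.mk.injEq]
    constructor
    · have hm := merge_counter (fun q => add2 q (endv u)) (add2_inj (endv u))
        (pathP v (0, 0)) (PySem.Dict.counter (pathP u (0, 0)))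
        (PySem.Dict.nodup_keys_counter _)
      rw [← pathP_from v (endv u)] at hm
      exact hm
    · simp [add2]

-- ===== VERDICT (by name: the statement is the Claim_ definition above) =====
set_option maxHeartbeats 1000000 in
theorem santa_spec : Claim_equal_santa := by
  intro directions _
  have hd : ∀ ms : List Char,
      santaLoopA ms 0 0 (PySem.Dict.empty.insert (0, 0) 1)
        = (solveB ms).1.items.foldl (fun d pc => d.modify pc.1 0 (· + pc.2))
            (PySem.Dict.empty.insert (0, 0) 1) := by
    intro ms
    rw [loopA_eq, solveB_eq]
    rw [show PySem.Dict.empty.insert ((0, 0) : Int × Int) (1 : Int)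
          = PySem.Dict.counter [((0 : Int), (0 : Int))] from (counter_single _).symm]
    have hm := merge_counter (fun q => q) (fun _ _ h => h) (pathP ms (0, 0))
      (PySem.Dict.counter [((0 : Int), (0 : Int))]) (PySem.Dict.nodup_keys_counter _)
    simp only [List.map_id'] at hm
    exact hm.symm
  show (santaLoopA (PySem.Str.strip directions).toList 0 0
      (PySem.Dict.empty.insert (0, 0) 1)).items.map (fun pc => (pc.1.1, pc.1.2, pc.2))
    = ((solveB (PySem.Str.strip directions).toList).1.items.foldl
        (fun d pc => d.modify pc.1 0 (· + pc.2))
        (PySem.Dict.empty.insert (0, 0) 1)).items.map (fun pc => (pc.1.1, pc.1.2, pc.2))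
  rw [hd]
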